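-- pv_equiv track=rewrite | github.com/Lifelong-Study1314/bazi-ai | backend/bazi_engine/elements.py | get_element_relationships
-- ===== SOURCE A (Python) =====
-- from enum import Enum
--
-- class Element(Enum):
--     """Five Elements"""
--     WOOD = "Wood"
--     FIRE = "Fire"
--     EARTH = "Earth"
--     METAL = "Metal"
--     WATER = "Water"
--
-- GENERATION_CYCLE = {
--     Element.WOOD: Element.FIRE,      # Wood fuels fire
--     Element.FIRE: Element.EARTH,     # Fire creates earth (ash)
--     Element.EARTH: Element.METAL,    # Earth bears metal
--     Element.METAL: Element.WATER,    # Metal collects water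
--     Element.WATER: Element.WOOD,     # Water nourishes wood
-- }
--
-- DESTRUCTION_CYCLE = {
--     Element.WOOD: Element.EARTH,     # Wood breaks earth
--     Element.EARTH: Element.WATER,    # Earth dams water
--     Element.WATER: Element.FIRE,     # Water extinguishes fire
--     Element.FIRE: Element.METAL,     # Fire melts metal
--     Element.METAL: Element.WOOD,     # Metal chops wood
-- }
--
-- def get_element_relationships(elem1: str, elem2: str) -> str:
--     """
--     Get relationship between two elements
--
--     Returns: "generates", "destroys", "same", "none"
--     """
--     elem1_obj = None
--     elem2_obj = None
--
--     for elem in Element: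
--         if elem.value == elem1:
--             elem1_obj = elem
--         if elem.value == elem2:
--             elem2_obj = elem
--
--     if elem1_obj is None or elem2_obj is None:
--         return "none"
--
--     if elem1_obj == elem2_obj:
--         return "same"
--
--     if GENERATION_CYCLE.get(elem1_obj) == elem2_obj:
--         return "generates"
--
--     if DESTRUCTION_CYCLE.get(elem1_obj) == elem2_obj:
--         return "destroys"
--
--     return "none"
-- ===== SOURCE B (Python) =====
-- ORDER = ["Wood", "Fire", "Earth", "Metal", "Water"]
--
-- def get_element_relationships(elem1: str, elem2: str) -> str:
--     if elem1 not in ORDER or elem2 not in ORDER: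
--         return "none"
--     d = (ORDER.index(elem2) - ORDER.index(elem1)) % 5
--     return {0: "same", 1: "generates", 2: "destroys"}.get(d, "none")
-- ===== Notes on version B (the rewrite author's own statement) =====
-- stated objective: simpler
-- what changed: Replaces the Enum scan and the two generation/destruction dicts with index lookups in the cyclic ordering and a single modular difference (i2-i1) mod 5 mapped to the result.
import Mathlib
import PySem

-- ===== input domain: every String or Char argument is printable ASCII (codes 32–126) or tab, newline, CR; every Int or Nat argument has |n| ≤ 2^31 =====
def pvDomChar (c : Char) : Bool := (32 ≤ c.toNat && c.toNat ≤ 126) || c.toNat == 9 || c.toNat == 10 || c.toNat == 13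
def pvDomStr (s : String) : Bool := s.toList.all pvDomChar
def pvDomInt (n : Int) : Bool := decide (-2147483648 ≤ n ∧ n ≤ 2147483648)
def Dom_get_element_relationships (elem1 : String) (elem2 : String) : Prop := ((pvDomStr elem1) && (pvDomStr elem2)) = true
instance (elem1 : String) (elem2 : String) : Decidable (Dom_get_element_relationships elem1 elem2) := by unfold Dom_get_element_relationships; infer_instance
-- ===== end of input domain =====

-- B replaces A's Enum scan plus generation/destruction dicts by index lookups in the
-- cyclic ordering and one modular difference (simpler, same cost).

-- ===== PORT A =====
inductive PvElement
  | wood | fire | earth | metal | water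
deriving DecidableEq, Repr

def pvElementValue : PvElement → String
  | .wood => "Wood"
  | .fire => "Fire"
  | .earth => "Earth"
  | .metal => "Metal"
  | .water => "Water"

-- iteration order of `for elem in Element`
def pvElementList : List PvElement := [.wood, .fire, .earth, .metal, .water]

def pvGenerationCycle : PySem.Dict PvElement PvElement :=
  PySem.Dict.ofList [(.wood, .fire), (.fire, .earth), (.earth, .metal), (.metal, .water), (.water, .wood)]

def pvDestructionCycle : PySem.Dict PvElement PvElement :=
  PySem.Dict.ofList [(.wood, .earth), (.earth, .water), (.water, .fire), (.fire, .metal), (.metal, .wood)]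

def get_element_relationships (elem1 : String) (elem2 : String) : String :=
  let objs := pvElementList.foldl
    (fun (s : Option PvElement × Option PvElement) elem =>
      (if pvElementValue elem == elem1 then some elem else s.1,
       if pvElementValue elem == elem2 then some elem else s.2))
    (none, none)
  match objs.1, objs.2 with
  | none, _ => "none"
  | _, none => "none"
  | some o1, some o2 =>
    if o1 == o2 then "same"
    else if pvGenerationCycle.get? o1 == some o2 then "generates"
    else if pvDestructionCycle.get? o1 == some o2 then "destroys"
    else "none"

-- ===== PORT B =====
def pvORDER : List String := ["Wood", "Fire", "Earth", "Metal", "Water"]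

def get_element_relationships_alt (elem1 : String) (elem2 : String) : String :=
  if ¬ (elem1 ∈ pvORDER) ∨ ¬ (elem2 ∈ pvORDER) then "none"
  else
    let i1 : Int := ((PySem.List.index? pvORDER elem1).getD 0 : Nat)
    let i2 : Int := ((PySem.List.index? pvORDER elem2).getD 0 : Nat)
    let d : Int := PySem.Int.mod (i2 - i1) 5
    PySem.Dict.getD (PySem.Dict.ofList [((0 : Int), "same"), (1, "generates"), (2, "destroys")]) d "none"

-- ===== PRECONDITION & SPEC =====
def Spec_get_element_relationships (elem1 : String) (elem2 : String) (out : String) : Prop := out = get_element_relationships_alt elem1 elem2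
instance (elem1 : String) (elem2 : String) (out : String) : Decidable (Spec_get_element_relationships elem1 elem2 out) := by unfold Spec_get_element_relationships; infer_instance

-- ===== CLAIM (what is proved, stated in full; the proofs are below) =====
def Claim_equal_get_element_relationships : Prop := ∀ (elem1 : String) (elem2 : String), Dom_get_element_relationships elem1 elem2 → Spec_get_element_relationships elem1 elem2 (get_element_relationships elem1 elem2)

-- ===== LEMMAS AND PROOFS =====

-- both programs return "none" whenever either argument is not one of the five names
theorem pv_a_none_left (elem1 elem2 : String) (h : elem1 ∉ pvORDER) :
    get_element_relationships elem1 elem2 = "none" := by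
  have h1 : elem1 ≠ "Wood" := by intro he; exact h (by simp [pvORDER, he])
  have h2 : elem1 ≠ "Fire" := by intro he; exact h (by simp [pvORDER, he])
  have h3 : elem1 ≠ "Earth" := by intro he; exact h (by simp [pvORDER, he])
  have h4 : elem1 ≠ "Metal" := by intro he; exact h (by simp [pvORDER, he])
  have h5 : elem1 ≠ "Water" := by intro he; exact h (by simp [pvORDER, he])
  simp [get_element_relationships, pvElementList, pvElementValue, List.foldl,
    Ne.symm h1, Ne.symm h2, Ne.symm h3, Ne.symm h4, Ne.symm h5]

theorem pv_a_none_right (elem1 elem2 : String) (h : elem2 ∉ pvORDER) :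
    get_element_relationships elem1 elem2 = "none" := by
  have h1 : elem2 ≠ "Wood" := by intro he; exact h (by simp [pvORDER, he])
  have h2 : elem2 ≠ "Fire" := by intro he; exact h (by simp [pvORDER, he])
  have h3 : elem2 ≠ "Earth" := by intro he; exact h (by simp [pvORDER, he])
  have h4 : elem2 ≠ "Metal" := by intro he; exact h (by simp [pvORDER, he])
  have h5 : elem2 ≠ "Water" := by intro he; exact h (by simp [pvORDER, he])
  simp [get_element_relationships, pvElementList, pvElementValue, List.foldl,
    Ne.symm h1, Ne.symm h2, Ne.symm h3, Ne.symm h4, Ne.symm h5]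
  split <;> simp_all

-- ===== VERDICT (by name: the statement is the Claim_ definition above) =====
theorem get_element_relationships_spec : Claim_equal_get_element_relationships := by
  intro elem1 elem2 _
  unfold Spec_get_element_relationships
  by_cases h1 : elem1 ∈ pvORDER
  · by_cases h2 : elem2 ∈ pvORDER
    · simp only [pvORDER, List.mem_cons, List.not_mem_nil, or_false] at h1 h2
      rcases h1 with h1 | h1 | h1 | h1 | h1 <;> rcases h2 with h2 | h2 | h2 | h2 | h2 <;>
        subst h1 <;> subst h2 <;> decide
    · rw [pv_a_none_right _ _ h2]
      simp [get_element_relationships_alt, h2]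
  · rw [pv_a_none_left _ _ h1]
    simp [get_element_relationships_alt, h1]
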